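-- pv_equiv track=rewrite | github.com/aaguueeroo/scientist_ai | backend/app/config/source_tiers.py | _minimize_domains_for_tavily
-- ===== SOURCE A (Python) =====
-- def _minimize_domains_for_tavily(hosts: frozenset[str] | set[str]) -> list[str]:
--     """Omit a host if it is a strict subdomain of another host in the set."""
--
--     hset: set[str] = set(hosts)
--     remove: set[str] = set()
--     for h in hset:
--         for parent in hset:
--             if h != parent and h.endswith(f".{parent}"):
--                 remove.add(h)
--     kept = hset - remove
--     return sorted(kept)
-- ===== SOURCE B (Python) =====
-- def _minimize_domains_for_tavily(hosts):
--     """Omit a host if it is a strict subdomain of another host in the set."""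
--     hset = set(hosts)
--     kept = [h for h in hset
--             if not any(h[i] == "." and h[i + 1:] in hset for i in range(len(h)))]
--     return sorted(kept)
-- ===== Notes on version B (the rewrite author's own statement) =====
-- stated objective: faster
-- what changed: Instead of A's nested pairwise scan testing h.endswith('.'+parent) for every pair of hosts, B builds the host set once and, for each host, walks its own dot-suffixes testing set membership, then sorts the survivors.
import Mathlib
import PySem

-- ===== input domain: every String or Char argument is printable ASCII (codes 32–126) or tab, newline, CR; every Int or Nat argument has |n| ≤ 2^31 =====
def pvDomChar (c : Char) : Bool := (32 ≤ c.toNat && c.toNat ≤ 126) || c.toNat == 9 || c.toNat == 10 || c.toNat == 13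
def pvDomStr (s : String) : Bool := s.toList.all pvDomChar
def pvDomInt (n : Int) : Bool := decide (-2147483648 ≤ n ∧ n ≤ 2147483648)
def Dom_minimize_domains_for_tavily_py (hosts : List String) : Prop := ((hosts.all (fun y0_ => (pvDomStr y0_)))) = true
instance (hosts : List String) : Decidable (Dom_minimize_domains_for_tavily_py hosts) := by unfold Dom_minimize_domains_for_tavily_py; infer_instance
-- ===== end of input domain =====

-- B replaces A's O(n^2) pairwise endswith scan by one hash-set membership test per dot-suffix of each host.


-- ===== PORT A =====
def minimize_domains_for_tavily_py (hosts : List String) : List String :=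
  let hset : PySem.Set String := PySem.Set.ofList hosts
  let remove : PySem.Set String :=
    hset.foldl (fun rem h =>
      hset.foldl (fun rem parent =>
        if h != parent && PySem.Chars.endswith h.toList ('.' :: parent.toList)
        then rem.add h else rem) rem) PySem.Set.empty
  let kept := PySem.Set.diff hset remove
  PySem.List.sorted kept (fun x => x) false

-- ===== PORT B =====
-- 'any(h[i] == "." and h[i+1:] in hset for i in range(len(h)))': walk the suffixes of h once.
def pvHasDotTail (hset : PySem.Set String) : List Char → Bool
  | [] => false
  | c :: rest => (c == '.' && hset.contains (String.ofList rest)) || pvHasDotTail hset rest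

def minimize_domains_for_tavily_py_alt (hosts : List String) : List String :=
  let hset : PySem.Set String := PySem.Set.ofList hosts
  let kept := hset.filter (fun h => !pvHasDotTail hset h.toList)
  PySem.List.sorted kept (fun x => x) false

-- ===== PRECONDITION & SPEC =====
def Spec_minimize_domains_for_tavily_py (hosts : List String) (out : List String) : Prop := out = minimize_domains_for_tavily_py_alt hosts
instance (hosts : List String) (out : List String) : Decidable (Spec_minimize_domains_for_tavily_py hosts out) := by unfold Spec_minimize_domains_for_tavily_py; infer_instance

-- ===== CLAIM (what is proved, stated in full; the proofs are below) =====
def Claim_equal_minimize_domains_for_tavily_py : Prop := ∀ (hosts : List String), Dom_minimize_domains_for_tavily_py hosts → Spec_minimize_domains_for_tavily_py hosts (minimize_domains_for_tavily_py hosts)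

-- ===== LEMMAS AND PROOFS =====

-- A's inner loop: membership in the fold that conditionally adds h.
theorem pv_mem_inner {l : List String} {rem : PySem.Set String} {h x : String}
    (cond : String → Bool) :
    x ∈ l.foldl (fun r p => if cond p then r.add h else r) rem ↔
      x ∈ rem ∨ (x = h ∧ ∃ p ∈ l, cond p = true) := by
  induction l generalizing rem with
  | nil => simp
  | cons p t ih =>
    simp only [List.foldl_cons, ih]
    by_cases hc : cond p = true
    · simp [hc, PySem.Set.mem_add]
      try tauto
    · simp [hc]
      try tauto

-- A's outer loop: membership in remove.
theorem pv_mem_remove {l l' : List String} {acc : PySem.Set String} {x : String}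
    (cond : String → String → Bool) :
    x ∈ l.foldl (fun rem h => l'.foldl (fun r p => if cond h p then r.add h else r) rem) acc ↔
      x ∈ acc ∨ (x ∈ l ∧ ∃ p ∈ l', cond x p = true) := by
  induction l generalizing acc with
  | nil => simp
  | cons h t ih =>
    simp only [List.foldl_cons, ih, pv_mem_inner]
    constructor
    · rintro (((hx | ⟨rfl, hp⟩) ) | ⟨hx, hp⟩)
      · exact Or.inl hx
      · exact Or.inr ⟨List.mem_cons_self .., hp⟩
      · exact Or.inr ⟨List.mem_cons_of_mem _ hx, hp⟩
    · rintro (hx | ⟨hx, hp⟩)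
      · exact Or.inl (Or.inl hx)
      · rcases List.mem_cons.mp hx with rfl | hx
        · exact Or.inl (Or.inr ⟨rfl, hp⟩)
        · exact Or.inr ⟨hx, hp⟩

-- B's suffix walk finds exactly the decompositions s = pre ++ '.' :: rest with rest in hset.
theorem pv_hasDotTail_iff (hset : PySem.Set String) (s : List Char) :
    pvHasDotTail hset s = true ↔
      ∃ pre rest, s = pre ++ '.' :: rest ∧ hset.contains (String.ofList rest) = true := by
  induction s with
  | nil => simp [pvHasDotTail]
  | cons c t ih =>
    simp only [pvHasDotTail, Bool.or_eq_true, Bool.and_eq_true, beq_iff_eq, ih]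
    constructor
    · rintro (⟨rfl, hc⟩ | ⟨pre, rest, rfl, hc⟩)
      · exact ⟨[], t, rfl, hc⟩
      · exact ⟨c :: pre, rest, rfl, hc⟩
    · rintro ⟨pre, rest, he, hc⟩
      cases pre with
      | nil => simp at he; exact Or.inl ⟨he.1, he.2 ▸ hc⟩
      | cons d pre' =>
        simp only [List.cons_append, List.cons.injEq] at he
        exact Or.inr ⟨pre', rest, he.2, hc⟩

-- The two per-host conditions agree for hosts drawn from the same set.
theorem pv_cond_iff (hset : PySem.Set String) (h : String) :
    (∃ p ∈ hset, (h != p && PySem.Chars.endswith h.toList ('.' :: p.toList)) = true) ↔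
      pvHasDotTail hset h.toList = true := by
  rw [pv_hasDotTail_iff]
  constructor
  · rintro ⟨p, hp, hc⟩
    simp only [Bool.and_eq_true, bne_iff_ne, PySem.Chars.endswith_iff] at hc
    obtain ⟨pre, hpre⟩ := hc.2
    exact ⟨pre, p.toList, hpre.symm, by simpa [PySem.Set.contains, List.contains_iff_mem] using hp⟩
  · rintro ⟨pre, rest, he, hc⟩
    refine ⟨String.ofList rest, ?_, ?_⟩
    · simpa [PySem.Set.contains, List.contains_iff_mem] using hc
    · simp only [Bool.and_eq_true, bne_iff_ne, PySem.Chars.endswith_iff]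
      constructor
      · intro heq
        have : h.toList = rest := by rw [heq]; simp
        rw [this] at he
        have := congrArg List.length he
        simp at this
        omega
      · exact ⟨pre, by simp [he]⟩

-- ===== VERDICT (by name: the statement is the Claim_ definition above) =====
theorem minimize_domains_for_tavily_py_spec : Claim_equal_minimize_domains_for_tavily_py := by
  intro hosts _
  unfold Spec_minimize_domains_for_tavily_py minimize_domains_for_tavily_py minimize_domains_for_tavily_py_alt
  simp only [PySem.Set.diff]
  congr 1
  apply List.filter_congr
  intro x hx
  congr 1
  rw [Bool.eq_iff_iff, PySem.Set.contains, List.contains_iff_mem, pv_mem_remove, ← pv_cond_iff]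
  simp [hx]
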